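-- pv_equiv track=rewrite | github.com/jcolinpatrick/kryptos | scripts/team/e_null_mask_crib_only.py | remove_nulls
-- ===== SOURCE A (Python) =====
-- def remove_nulls(ct: str, null_positions: frozenset) -> tuple:
--     """Remove null positions from CT, returning (reduced_ct, orig_to_reduced_map).
--
--     orig_to_reduced_map[orig_pos] = reduced_pos for non-null positions.
--     """
--     reduced = []
--     orig_to_reduced = {}
--     reduced_idx = 0
--     for i, ch in enumerate(ct):
--         if i not in null_positions:
--             reduced.append(ch)
--             orig_to_reduced[i] = reduced_idx
--             reduced_idx += 1
--     return "".join(reduced), orig_to_reduced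
-- ===== SOURCE B (Python) =====
-- def remove_nulls(ct: str, null_positions: frozenset) -> tuple:
--     """Remove null positions from CT, returning (reduced_ct, orig_to_reduced_map).
--
--     Segment-copy algorithm: sort the in-range null positions, then copy the
--     gap between consecutive nulls as a whole slice, numbering the positions
--     of each gap with a running offset.
--     """
--     n = len(ct)
--     nulls = sorted(p for p in null_positions if 0 <= p < n)
--     parts = []
--     orig_to_reduced = {}
--     prev = 0
--     r = 0
--     for p in nulls:
--         parts.append(ct[prev:p])
--         for orig in range(prev, p):
--             orig_to_reduced[orig] = r
--             r += 1
--         prev = p + 1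
--     parts.append(ct[prev:])
--     for orig in range(prev, n):
--         orig_to_reduced[orig] = r
--         r += 1
--     return "".join(parts), orig_to_reduced
-- ===== Notes on version B (the rewrite author's own statement) =====
-- stated objective: alternative
-- what changed: Replaces A's per-index membership filter (one pass testing every index against the null set) by a segment-copy algorithm: the in-range null positions are sorted once, then each gap between consecutive nulls is copied as a whole slice and its positions numbered with a running offset.
import Mathlib
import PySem

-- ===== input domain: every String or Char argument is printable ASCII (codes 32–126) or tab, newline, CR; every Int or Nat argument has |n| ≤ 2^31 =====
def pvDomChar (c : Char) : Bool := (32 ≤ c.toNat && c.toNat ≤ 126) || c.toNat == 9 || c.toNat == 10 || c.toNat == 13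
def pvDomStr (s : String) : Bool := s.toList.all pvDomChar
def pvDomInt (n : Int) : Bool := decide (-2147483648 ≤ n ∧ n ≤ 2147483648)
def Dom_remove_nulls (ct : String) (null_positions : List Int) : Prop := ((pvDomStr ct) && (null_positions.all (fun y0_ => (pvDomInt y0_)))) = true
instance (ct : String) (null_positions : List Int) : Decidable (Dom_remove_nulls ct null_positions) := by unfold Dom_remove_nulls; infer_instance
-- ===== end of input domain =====

-- B replaces A's per-index membership filter by a segment-copy algorithm: sort the in-range
-- null positions once, then copy each gap between consecutive nulls as a whole slice,
-- numbering each gap's positions with a running offset (objective: alternative).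

-- ===== PORT A =====
def remove_nulls (ct : String) (null_positions : List Int) : String × (List (Int × Int)) :=
  let st := (PySem.List.enumerate ct.toList 0).foldl
    (fun (s : List Char × List (Int × Int) × Int) (p : Int × Char) =>
      if null_positions.contains p.1 then s
      else (s.1 ++ [p.2], s.2.1 ++ [(p.1, s.2.2)], s.2.2 + 1))
    ([], [], 0)
  (String.ofList st.1, st.2.1)

-- ===== PORT B =====
def remove_nulls_alt (ct : String) (null_positions : List Int) : String × (List (Int × Int)) :=
  let n : Int := ct.toList.length
  let nulls := PySem.List.sorted (null_positions.filter (fun p => decide (0 ≤ p) && decide (p < n))) id false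
  let st := nulls.foldl
    (fun (s : List (List Char) × List (Int × Int) × Int × Int) (p : Int) =>
      let mr := (PySem.List.pyRange s.2.2.1 p 1).foldl
        (fun (mr : List (Int × Int) × Int) (o : Int) => (mr.1 ++ [(o, mr.2)], mr.2 + 1))
        (s.2.1, s.2.2.2)
      (s.1 ++ [PySem.List.slice ct.toList (some s.2.2.1) (some p)], mr.1, p + 1, mr.2))
    ([], [], 0, 0)
  let parts := st.1 ++ [PySem.List.slice ct.toList (some st.2.2.1) none]
  let mr := (PySem.List.pyRange st.2.2.1 n 1).foldl
    (fun (mr : List (Int × Int) × Int) (o : Int) => (mr.1 ++ [(o, mr.2)], mr.2 + 1))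
    (st.2.1, st.2.2.2)
  (String.ofList parts.flatten, mr.1)

-- ===== PRECONDITION & SPEC =====
def Spec_remove_nulls (ct : String) (null_positions : List Int) (out : String × (List (Int × Int))) : Prop := out = remove_nulls_alt ct null_positions
instance (ct : String) (null_positions : List Int) (out : String × (List (Int × Int))) : Decidable (Spec_remove_nulls ct null_positions out) := by unfold Spec_remove_nulls; infer_instance

-- ===== CLAIM (what is proved, stated in full; the proofs are below) =====
def Claim_equal_remove_nulls : Prop := ∀ (ct : String) (null_positions : List Int), Dom_remove_nulls ct null_positions → Spec_remove_nulls ct null_positions (remove_nulls ct null_positions)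

-- ===== LEMMAS AND PROOFS =====

-- proof-side names for B's two loop bodies and its trailing passes (definitionally
-- equal to the lambdas in remove_nulls_alt)
def innerB : (List (Int × Int) × Int) → Int → (List (Int × Int) × Int) :=
  fun mr o => (mr.1 ++ [(o, mr.2)], mr.2 + 1)

def bodyB (xs : List Char) :
    (List (List Char) × List (Int × Int) × Int × Int) → Int →
    (List (List Char) × List (Int × Int) × Int × Int) :=
  fun s p =>
    (s.1 ++ [PySem.List.slice xs (some s.2.2.1) (some p)],
     ((PySem.List.pyRange s.2.2.1 p 1).foldl innerB (s.2.1, s.2.2.2)).1,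
     p + 1,
     ((PySem.List.pyRange s.2.2.1 p 1).foldl innerB (s.2.1, s.2.2.2)).2)

def finishB (xs : List Char) (st : List (List Char) × List (Int × Int) × Int × Int) :
    List Char × List (Int × Int) :=
  ((st.1 ++ [PySem.List.slice xs (some st.2.2.1) none]).flatten,
   ((PySem.List.pyRange st.2.2.1 (xs.length : Int) 1).foldl innerB (st.2.1, st.2.2.2)).1)

theorem pyGetD_cons_pos {α : Type} (c : α) (t : List α) (j : Int) (d : α) (h : 1 ≤ j) :
    PySem.List.pyGetD (c :: t) j d = PySem.List.pyGetD t (j - 1) d := by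
  obtain ⟨k, rfl⟩ : ∃ k : Nat, j = (k : Int) + 1 := ⟨(j - 1).toNat, by omega⟩
  have h2 : ((k : Int) + 1 - 1) = (k : Int) := by ring
  have h1 : ((k : Int) + 1) = ((k + 1 : Nat) : Int) := by push_cast; ring
  rw [h2, h1, PySem.List.pyGetD_natCast, PySem.List.pyGetD_natCast, List.getD_cons_succ]

-- closed form of A's interleaved loop
theorem rn_fold (nps : List Int) (l : List Char) (s : Int)
    (red : List Char) (m : List (Int × Int)) (ridx : Int) :
    (PySem.List.enumerate l s).foldl
      (fun (st : List Char × List (Int × Int) × Int) (p : Int × Char) =>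
        if nps.contains p.1 then st
        else (st.1 ++ [p.2], st.2.1 ++ [(p.1, st.2.2)], st.2.2 + 1))
      (red, m, ridx) =
    (red ++ (((PySem.List.pyRange s (s + l.length) 1).filter (fun i => !nps.contains i)).map
               (fun i => PySem.List.pyGetD l (i - s) ' ')),
     m ++ (PySem.List.enumerate
             ((PySem.List.pyRange s (s + l.length) 1).filter (fun i => !nps.contains i)) ridx).map
             (fun p => (p.2, p.1)),
     ridx + (((PySem.List.pyRange s (s + l.length) 1).filter (fun i => !nps.contains i)).length : Int)) := by
  induction l generalizing s red m ridx with
  | nil =>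
    simp [PySem.List.enumerate_nil, PySem.List.pyRange_one_eq_nil (le_refl s)]
  | cons c t ih =>
    have hcast : s + ((c :: t).length : Int) = (s + 1) + (t.length : Int) := by
      push_cast [List.length_cons]; ring
    have hlt : s < s + ((c :: t).length : Int) := by
      have : (0 : Int) ≤ (t.length : Int) := Int.natCast_nonneg _
      simp only [List.length_cons]; push_cast; omega
    have hrange : PySem.List.pyRange s (s + ((c :: t).length : Int)) 1
        = s :: PySem.List.pyRange (s + 1) ((s + 1) + (t.length : Int)) 1 := by
      rw [PySem.List.pyRange_one_cons hlt, hcast]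
    have hmapcongr :
        ((PySem.List.pyRange (s + 1) ((s + 1) + (t.length : Int)) 1).filter
            (fun i => !nps.contains i)).map (fun i => PySem.List.pyGetD (c :: t) (i - s) ' ')
        = ((PySem.List.pyRange (s + 1) ((s + 1) + (t.length : Int)) 1).filter
            (fun i => !nps.contains i)).map (fun i => PySem.List.pyGetD t (i - (s + 1)) ' ') := by
      apply List.map_congr_left
      intro i hi
      have hi' : i ∈ PySem.List.pyRange (s + 1) ((s + 1) + (t.length : Int)) 1 :=
        List.mem_of_mem_filter hi
      have hb := (PySem.List.mem_pyRange_one.mp hi').1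
      rw [pyGetD_cons_pos c t (i - s) ' ' (by omega)]
      congr 1; ring
    rw [PySem.List.enumerate_cons, List.foldl_cons, hrange, List.filter_cons]
    cases hc : nps.contains s with
    | true =>
      simp only [if_true, Bool.not_true, Bool.false_eq_true, if_false]
      rw [ih (s + 1) red m ridx, hmapcongr]
    | false =>
      simp only [Bool.false_eq_true, if_false, Bool.not_false, if_true]
      rw [ih (s + 1) (red ++ [c]) (m ++ [(s, ridx)]) (ridx + 1)]
      simp only [List.map_cons, PySem.List.enumerate_cons, List.length_cons]
      rw [hmapcongr]
      refine Prod.ext ?_ (Prod.ext ?_ ?_)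
      · simp [List.append_assoc, sub_self, PySem.List.pyGetD_zero_cons]
      · simp [List.append_assoc]
      · push_cast; ring

-- closed form of B's inner numbering loop
theorem inner_fold (xs : List Int) (m : List (Int × Int)) (r : Int) :
    xs.foldl innerB (m, r)
      = (m ++ (PySem.List.enumerate xs r).map (fun p => (p.2, p.1)), r + (xs.length : Int)) := by
  induction xs generalizing m r with
  | nil => simp [PySem.List.enumerate_nil]
  | cons x t ih =>
    rw [List.foldl_cons]
    show List.foldl innerB (m ++ [(x, r)], r + 1) t = _
    rw [ih]
    simp [PySem.List.enumerate_cons, List.append_assoc]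
    ring

-- a fully in-range slice is the map of pyGetD over the index range (Nat core)
theorem range_map_getD {α : Type} (xs : List α) (d : α) (a m : Nat) (h : a + m ≤ xs.length) :
    (List.range m).map (fun k => xs.getD (a + k) d) = (xs.drop a).take m := by
  induction m with
  | zero => simp
  | succ k ih =>
    rw [List.range_succ, List.map_append, ih (by omega), List.take_add_one]
    simp only [List.map_cons, List.map_nil]
    have hlt : a + k < xs.length := by omega
    have h1 : (xs.drop a)[k]? = some xs[a + k] := by
      rw [List.getElem?_drop]
      exact List.getElem?_eq_getElem (by omega)
    rw [h1]
    simp [List.getD_eq_getElem?_getD, List.getElem?_eq_getElem hlt]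

theorem slice_eq_map_range {α : Type} (xs : List α) (d : α) (a b : Int)
    (h0 : 0 ≤ a) (hab : a ≤ b) (hb : b ≤ (xs.length : Int)) :
    PySem.List.slice xs (some a) (some b)
      = (PySem.List.pyRange a b 1).map (fun i => PySem.List.pyGetD xs i d) := by
  rw [PySem.List.slice_toNat xs h0 (by omega), PySem.List.pyRange_one, List.map_map]
  have he : ((fun i => PySem.List.pyGetD xs i d) ∘ fun k : Nat => a + (k : Int))
      = fun k : Nat => xs.getD (a.toNat + k) d := by
    funext k
    simp only [Function.comp]
    have : a + (k : Int) = ((a.toNat + k : Nat) : Int) := by push_cast; omega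
    rw [this, PySem.List.pyGetD_natCast]
  rw [he]
  have hm : (b - a).toNat = b.toNat - a.toNat := by omega
  rw [hm, range_map_getD xs d a.toNat (b.toNat - a.toNat) (by omega)]

-- splitting the kept-index range at the first remaining null
theorem filter_range_split (ps : List Int) (p prev n : Int)
    (hpn : p < n) (hprev : prev - 1 ≤ p)
    (htail : ∀ x ∈ ps, p ≤ x) :
    (PySem.List.pyRange prev n 1).filter (fun i => !(p :: ps).contains i)
      = PySem.List.pyRange prev p 1
        ++ (PySem.List.pyRange (p + 1) n 1).filter (fun i => !ps.contains i) := by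
  by_cases hle : prev ≤ p
  · rw [PySem.List.pyRange_one_append prev p n hle (by omega), PySem.List.pyRange_one_cons hpn,
        List.filter_append, List.filter_cons]
    have h1 : (PySem.List.pyRange prev p 1).filter (fun i => !(p :: ps).contains i)
        = PySem.List.pyRange prev p 1 := by
      apply List.filter_eq_self.mpr
      intro i hi
      have hib := (PySem.List.mem_pyRange_one.mp hi).2
      simp only [Bool.not_eq_eq_eq_not, Bool.not_true, List.contains_eq_mem, decide_eq_false_iff_not,
        List.mem_cons, not_or]
      exact ⟨by omega, fun hx => absurd (htail i hx) (by omega)⟩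
    have h2 : ((p :: ps).contains p) = true := by simp
    have h3 : (PySem.List.pyRange (p + 1) n 1).filter (fun i => !(p :: ps).contains i)
        = (PySem.List.pyRange (p + 1) n 1).filter (fun i => !ps.contains i) := by
      apply List.filter_congr
      intro i hi
      have hib := (PySem.List.mem_pyRange_one.mp hi).1
      simp only [List.contains_cons]
      have : (i == p) = false := by simp; omega
      rw [this, Bool.false_or]
    rw [h1, h2, h3]
    simp
  · rw [PySem.List.pyRange_one_eq_nil (by omega : p ≤ prev), List.nil_append]
    have hr : PySem.List.pyRange (p + 1) n 1 = PySem.List.pyRange prev n 1 := by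
      have : p + 1 = prev := by omega
      rw [this]
    rw [hr]
    apply List.filter_congr
    intro i hi
    have hib := (PySem.List.mem_pyRange_one.mp hi).1
    simp only [List.contains_cons]
    have : (i == p) = false := by simp; omega
    rw [this, Bool.false_or]

-- closed form of B's outer segment loop followed by its two trailing passes
theorem b_run (xs : List Char) (ps : List Int) (parts : List (List Char))
    (m : List (Int × Int)) (prev r : Int)
    (hs : ps.Pairwise (· ≤ ·))
    (hmem : ∀ x ∈ ps, 0 ≤ x ∧ x < (xs.length : Int) ∧ prev - 1 ≤ x)
    (h0 : 0 ≤ prev) (hn : prev ≤ (xs.length : Int)) :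
    finishB xs (ps.foldl (bodyB xs) (parts, m, prev, r))
    = (parts.flatten
        ++ ((PySem.List.pyRange prev (xs.length : Int) 1).filter (fun i => !ps.contains i)).map
             (fun i => PySem.List.pyGetD xs i ' '),
       m ++ (PySem.List.enumerate
               ((PySem.List.pyRange prev (xs.length : Int) 1).filter (fun i => !ps.contains i)) r).map
               (fun p => (p.2, p.1))) := by
  induction ps generalizing parts m prev r with
  | nil =>
    simp only [List.foldl_nil, finishB]
    have hfe : (PySem.List.pyRange prev (xs.length : Int) 1).filter
          (fun i => !([] : List Int).contains i)
        = PySem.List.pyRange prev (xs.length : Int) 1 := by simp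
    rw [hfe, inner_fold]
    have hsl : PySem.List.slice xs (some prev) none
        = (PySem.List.pyRange prev (xs.length : Int) 1).map (fun i => PySem.List.pyGetD xs i ' ') := by
      rw [PySem.List.slice_from xs h0]
      rw [PySem.List.map_pyGetD_pyRange' xs ' ' h0]
    rw [hsl]
    simp
  | cons p t ih =>
    obtain ⟨hx0, hxn, hxp⟩ := hmem p (List.mem_cons_self ..)
    have htail : ∀ x ∈ t, p ≤ x := fun x hx => (List.pairwise_cons.mp hs).1 x hx
    rw [List.foldl_cons]
    have hbody : bodyB xs (parts, m, prev, r) p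
        = (parts ++ [PySem.List.slice xs (some prev) (some p)],
           m ++ (PySem.List.enumerate (PySem.List.pyRange prev p 1) r).map (fun q => (q.2, q.1)),
           p + 1,
           r + ((PySem.List.pyRange prev p 1).length : Int)) := by
      simp only [bodyB, inner_fold]
    rw [hbody]
    rw [ih (parts ++ [PySem.List.slice xs (some prev) (some p)])
        (m ++ (PySem.List.enumerate (PySem.List.pyRange prev p 1) r).map (fun q => (q.2, q.1)))
        (p + 1) (r + ((PySem.List.pyRange prev p 1).length : Int))
        (List.pairwise_cons.mp hs).2
        (fun x hx => ⟨(hmem x (List.mem_cons_of_mem _ hx)).1,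
          (hmem x (List.mem_cons_of_mem _ hx)).2.1, by have := htail x hx; omega⟩)
        (by omega) (by omega)]
    rw [filter_range_split t p prev (xs.length : Int) hxn hxp htail]
    have hsl : PySem.List.slice xs (some prev) (some p)
        = (PySem.List.pyRange prev p 1).map (fun i => PySem.List.pyGetD xs i ' ') := by
      by_cases hle : prev ≤ p
      · exact slice_eq_map_range xs ' ' prev p h0 hle (by omega)
      · rw [PySem.List.pyRange_one_eq_nil (by omega : p ≤ prev), List.map_nil,
            PySem.List.slice_toNat xs h0 hx0]
        have : p.toNat - prev.toNat = 0 := by omega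
        rw [this, List.take_zero]
    refine Prod.ext ?_ ?_
    · simp [hsl, List.map_append, List.append_assoc]
    · rw [List.map_append, PySem.List.enumerate_append, List.map_append, List.append_assoc]


-- B's port in closed form
theorem alt_closed (ct : String) (nps : List Int) :
    remove_nulls_alt ct nps
      = (String.ofList
          (((PySem.List.pyRange 0 (ct.toList.length : Int) 1).filter
              (fun i => !(PySem.List.sorted
                  (nps.filter (fun p => decide (0 ≤ p) && decide (p < (ct.toList.length : Int)))) id false).contains i)).map
            (fun i => PySem.List.pyGetD ct.toList i ' ')),
         (PySem.List.enumerate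
            ((PySem.List.pyRange 0 (ct.toList.length : Int) 1).filter
              (fun i => !(PySem.List.sorted
                  (nps.filter (fun p => decide (0 ≤ p) && decide (p < (ct.toList.length : Int)))) id false).contains i)) 0).map
           (fun p => (p.2, p.1))) := by
  have hrun := b_run ct.toList
    (PySem.List.sorted (nps.filter (fun p => decide (0 ≤ p) && decide (p < (ct.toList.length : Int)))) id false)
    [] [] 0 0
    (PySem.List.sorted_pairwise ..)
    (fun x hx => by
      have hx' := (PySem.List.mem_sorted ..).mp hx
      have hm := List.mem_filter.mp hx'
      simp only [Bool.and_eq_true, decide_eq_true_eq] at hm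
      exact ⟨hm.2.1, hm.2.2, by omega⟩)
    (le_refl 0) (Int.natCast_nonneg _)
  simp only [List.flatten_nil, List.nil_append] at hrun
  show (String.ofList (finishB ct.toList
        ((PySem.List.sorted (nps.filter (fun p => decide (0 ≤ p) && decide (p < (ct.toList.length : Int)))) id false).foldl
          (bodyB ct.toList) ([], [], 0, 0))).1,
      (finishB ct.toList
        ((PySem.List.sorted (nps.filter (fun p => decide (0 ≤ p) && decide (p < (ct.toList.length : Int)))) id false).foldl
          (bodyB ct.toList) ([], [], 0, 0))).2) = _
  rw [hrun]

-- ===== VERDICT (by name: the statement is the Claim_ definition above) =====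
theorem remove_nulls_spec : Claim_equal_remove_nulls := by
  intro ct nps _
  unfold Spec_remove_nulls remove_nulls
  rw [rn_fold nps ct.toList 0 [] [] 0, alt_closed]
  have hfc : ((PySem.List.pyRange 0 (ct.toList.length : Int) 1).filter
        (fun i => !(PySem.List.sorted
            (nps.filter (fun p => decide (0 ≤ p) && decide (p < (ct.toList.length : Int)))) id false).contains i))
      = (PySem.List.pyRange 0 (ct.toList.length : Int) 1).filter (fun i => !nps.contains i) := by
    apply List.filter_congr
    intro i hi
    have hib := PySem.List.mem_pyRange_one.mp hi
    have hmemiff : i ∈ PySem.List.sorted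
        (nps.filter (fun p => decide (0 ≤ p) && decide (p < (ct.toList.length : Int)))) id false
        ↔ i ∈ nps := by
      rw [PySem.List.mem_sorted, List.mem_filter]
      constructor
      · rintro ⟨h1, _⟩; exact h1
      · intro h1
        refine ⟨h1, ?_⟩
        simp only [Bool.and_eq_true, decide_eq_true_eq]
        omega
    simp only [List.contains_eq_mem]
    rw [decide_eq_decide.mpr hmemiff]
  rw [hfc]
  simp only [zero_add, sub_zero, List.nil_append]
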